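-- pv_equiv track=rewrite | github.com/wyk18703232953/myResearch | codeComplex/data copy/filteredData/python/cubic/python_cubic_0129.py | solve
-- ===== SOURCE A (Python) =====
-- def check(s, a, b, after):
--     ns, na, nb = len(s), len(a), len(b)
--     if ns < na + nb:
--         return False
--
--     dp = [[0 for _ in range(nb+1)] for _ in range(na+1)]
--     for i in range(na+1):
--         for j in range(nb+1):
--             if i == 0 and j == 0:
--                 continue
--             dp[i][j] = min(after[dp[i-1][j]][a[i-1]] if i > 0 else ns,
--                            after[dp[i][j-1]][b[j-1]] if j > 0 else ns) + 1
--
--     return dp[na][nb] <= ns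
--
-- def solve(s, t):
--     ns = len(s)
--     after = [[ns for _ in range(26)] for _ in range(ns+2)]
--     for i in range(ns-1, -1, -1):
--         for j in range(26):
--             after[i][j] = after[i+1][j]
--         after[i][s[i]] = i
--
--     for i in range(len(t)):
--         a, b = t[:i], t[i:]
--         if check(s, a, b, after):
--             return 'YES'
--
--     return 'NO'
-- ===== SOURCE B (Python) =====
-- def solve(s, t):
--     ns = len(s)
--     after = [[ns for _ in range(26)] for _ in range(ns+2)]
--     for i in range(ns-1, -1, -1):
--         for j in range(26):
--             after[i][j] = after[i+1][j]
--         after[i][s[i]] = i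
--
--     def check(a, b):
--         na, nb = len(a), len(b)
--         if ns < na + nb:
--             return False
--         memo = {}
--
--         def f(i, j):
--             # earliest position in s strictly after embedding a[:i] and b[:j] disjointly
--             if i == 0 and j == 0:
--                 return 0
--             key = (i, j)
--             if key in memo:
--                 return memo[key]
--             va = after[f(i - 1, j)][a[i - 1]] if i > 0 else ns
--             vb = after[f(i, j - 1)][b[j - 1]] if j > 0 else ns
--             r = min(va, vb) + 1
--             memo[key] = r
--             return r
--
--         return f(na, nb) <= ns
--
--     for i in range(len(t)):
--         if check(t[:i], t[i:]):
--             return 'YES'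
--     return 'NO'
-- ===== Notes on version B (the rewrite author's own statement) =====
-- stated objective: alternative
-- what changed: check's bottom-up fill of a preallocated (na+1)x(nb+1) grid is replaced by a top-down memoized recursion f(i,j) driven from the goal cell (na,nb), caching results in a dict; the suffix table and split loop are unchanged.
import Mathlib
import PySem

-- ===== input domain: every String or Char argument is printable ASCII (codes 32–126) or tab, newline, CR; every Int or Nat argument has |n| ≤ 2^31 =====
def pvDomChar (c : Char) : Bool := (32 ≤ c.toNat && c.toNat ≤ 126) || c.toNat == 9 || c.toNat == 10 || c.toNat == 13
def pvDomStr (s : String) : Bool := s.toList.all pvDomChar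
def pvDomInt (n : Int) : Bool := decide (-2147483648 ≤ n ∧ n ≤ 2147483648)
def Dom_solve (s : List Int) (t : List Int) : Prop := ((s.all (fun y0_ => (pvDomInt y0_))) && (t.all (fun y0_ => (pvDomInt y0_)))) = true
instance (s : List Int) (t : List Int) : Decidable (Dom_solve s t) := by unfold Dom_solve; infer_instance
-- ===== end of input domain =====

-- B replaces check's bottom-up fill of a preallocated 2-D grid with a top-down memoized
-- recursion f(i,j) driven from the goal cell, caching results in a dict (alternative
-- decomposition, same asymptotic cost).

-- ===== PORT A =====

-- after[v][c] with a default of ns (both indexings are in range on every admitted input)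
def pvAt (after : List (List Int)) (ns v c : Int) : Int :=
  PySem.List.pyGetD (PySem.List.pyGetD after v []) c ns

-- the suffix table `after` built by solve's first loop (shared text of Source A and Source B)
def pvAfter (s : List Int) : List (List Int) :=
  let ns : Int := s.length
  let after0 : List (List Int) :=
    (PySem.List.pyRange 0 (ns+2)).map (fun _ => (PySem.List.pyRange 0 26).map (fun _ => ns))
  (PySem.List.pyRange (ns-1) (-1) (-1)).foldl (fun aft i =>
    let aft := (PySem.List.pyRange 0 26).foldl (fun a2 j =>
      PySem.List.pySetD a2 i (PySem.List.pySetD (PySem.List.pyGetD a2 i []) j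
        (PySem.List.pyGetD (PySem.List.pyGetD a2 (i+1) []) j ns))) aft
    PySem.List.pySetD aft i (PySem.List.pySetD (PySem.List.pyGetD aft i [])
      (PySem.List.pyGetD s i 0) i)) after0

-- A's helper check: bottom-up (na+1)×(nb+1) grid, filled in place
def pvCheck (s a b : List Int) (after : List (List Int)) : Bool :=
  let ns : Int := s.length
  let na : Int := a.length
  let nb : Int := b.length
  if ns < na + nb then false
  else
    let dp0 : List (List Int) :=
      (PySem.List.pyRange 0 (na+1)).map (fun _ => (PySem.List.pyRange 0 (nb+1)).map (fun _ => (0:Int)))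
    let dp := (PySem.List.pyRange 0 (na+1)).foldl (fun dp i =>
      (PySem.List.pyRange 0 (nb+1)).foldl (fun dp j =>
        if i = 0 ∧ j = 0 then dp
        else PySem.List.pySetD dp i (PySem.List.pySetD (PySem.List.pyGetD dp i []) j
          (min (if 0 < i then pvAt after ns (PySem.List.pyGetD (PySem.List.pyGetD dp (i-1) []) j 0) (PySem.List.pyGetD a (i-1) 0) else ns)
               (if 0 < j then pvAt after ns (PySem.List.pyGetD (PySem.List.pyGetD dp i []) (j-1) 0) (PySem.List.pyGetD b (j-1) 0) else ns) + 1))) dp) dp0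
    decide (PySem.List.pyGetD (PySem.List.pyGetD dp na []) nb 0 ≤ ns)

def solve (s : List Int) (t : List Int) : String :=
  let after := pvAfter s
  if (PySem.List.pyRange 0 (t.length : Int)).any (fun i =>
      pvCheck s (PySem.List.slice t none (some i)) (PySem.List.slice t (some i) none) after)
  then "YES" else "NO"

-- ===== PORT B =====

-- B's inner f: top-down memoized recursion; the memo dict is threaded through
def pvF (ns : Int) (after : List (List Int)) (a b : List Int)
    (i j : Nat) (memo : PySem.Dict (Int × Int) Int) : Int × PySem.Dict (Int × Int) Int :=
  if i = 0 ∧ j = 0 then (0, memo)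
  else
    match PySem.Dict.get? memo ((i:Int), (j:Int)) with
    | some v => (v, memo)
    | none =>
      let p1 := if _h : 0 < i then
          let q := pvF ns after a b (i-1) j memo
          (pvAt after ns q.1 (PySem.List.pyGetD a ((i:Int)-1) 0), q.2)
        else (ns, memo)
      let p2 := if _h : 0 < j then
          let q := pvF ns after a b i (j-1) p1.2
          (pvAt after ns q.1 (PySem.List.pyGetD b ((j:Int)-1) 0), q.2)
        else (ns, p1.2)
      let r := min p1.1 p2.1 + 1
      (r, PySem.Dict.insert p2.2 ((i:Int), (j:Int)) r)
  termination_by i + j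
  decreasing_by all_goals omega

-- B's helper check: goal-driven evaluation starting from (na, nb)
def pvCheckTD (s a b : List Int) (after : List (List Int)) : Bool :=
  let ns : Int := s.length
  let na : Int := a.length
  let nb : Int := b.length
  if ns < na + nb then false
  else
    decide ((pvF ns after a b a.length b.length PySem.Dict.empty).1 ≤ ns)

def solve_alt (s : List Int) (t : List Int) : String :=
  let after := pvAfter s
  if (PySem.List.pyRange 0 (t.length : Int)).any (fun i =>
      pvCheckTD s (PySem.List.slice t none (some i)) (PySem.List.slice t (some i) none) after)
  then "YES" else "NO"

-- ===== PRECONDITION & SPEC =====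
-- Pre_ excludes exactly the inputs where A raises IndexError: an element of s outside [-26,26),
-- or (when len(t) ≤ len(s), so the dp fill is reached) an element of t outside [-26,26).
def Pre_solve (s : List Int) (t : List Int) : Prop :=
  (∀ x ∈ s, -26 ≤ x ∧ x < 26) ∧ (t.length ≤ s.length → ∀ x ∈ t, -26 ≤ x ∧ x < 26)
instance (s : List Int) (t : List Int) : Decidable (Pre_solve s t) := by unfold Pre_solve; infer_instance

def pvWitness_solve : List Int × List Int := ([0, 1, 2], [0, 2])

def Spec_solve (s : List Int) (t : List Int) (out : String) : Prop := out = solve_alt s t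
instance (s : List Int) (t : List Int) (out : String) : Decidable (Spec_solve s t out) := by unfold Spec_solve; infer_instance

-- ===== CLAIM (what is proved, stated in full; the proofs are below) =====
def Claim_equal_solve : Prop := ∀ (s : List Int) (t : List Int), Dom_solve s t → Pre_solve s t → Spec_solve s t (solve s t)

-- ===== LEMMAS AND PROOFS =====

theorem mem_pySetD {α : Type} {xs : List α} {i : Int} {v x : α}
    (h : x ∈ PySem.List.pySetD xs i v) : x ∈ xs ∨ x = v := by
  unfold PySem.List.pySetD PySem.List.pySet? at h
  cases hk : PySem.List.pyIdx? xs.length i with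
  | none => rw [hk] at h; exact .inl h
  | some k => rw [hk] at h; exact List.mem_or_eq_of_mem_set h

-- the shared recurrence of both DP evaluations
def pvD (ns : Int) (after : List (List Int)) (a b : List Int) : Nat → Nat → Int
  | 0, 0 => 0
  | i+1, 0 => min (pvAt after ns (pvD ns after a b i 0) (PySem.List.pyGetD a i 0)) ns + 1
  | 0, j+1 => min ns (pvAt after ns (pvD ns after a b 0 j) (PySem.List.pyGetD b j 0)) + 1
  | i+1, j+1 => min (pvAt after ns (pvD ns after a b i (j+1)) (PySem.List.pyGetD a i 0))
                    (pvAt after ns (pvD ns after a b (i+1) j) (PySem.List.pyGetD b j 0)) + 1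
  termination_by i j => i + j

theorem pvD_zz (ns after a b) : pvD ns after a b 0 0 = 0 := by rw [pvD]
theorem pvD_a0 (ns after a b) (i : Nat) : pvD ns after a b (i+1) 0
    = min (pvAt after ns (pvD ns after a b i 0) (PySem.List.pyGetD a (i:Int) 0)) ns + 1 := by rw [pvD]
theorem pvD_0b (ns after a b) (j : Nat) : pvD ns after a b 0 (j+1)
    = min ns (pvAt after ns (pvD ns after a b 0 j) (PySem.List.pyGetD b (j:Int) 0)) + 1 := by rw [pvD]
theorem pvD_ab (ns after a b) (i j : Nat) : pvD ns after a b (i+1) (j+1)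
    = min (pvAt after ns (pvD ns after a b i (j+1)) (PySem.List.pyGetD a (i:Int) 0))
          (pvAt after ns (pvD ns after a b (i+1) j) (PySem.List.pyGetD b (j:Int) 0)) + 1 := by rw [pvD]

-- ===== B side: the memoized recursion computes pvD =====

def Sound (ns : Int) (after : List (List Int)) (a b : List Int)
    (memo : PySem.Dict (Int × Int) Int) : Prop :=
  ∀ (i j : Nat) (v : Int), memo.get? ((i:Int), (j:Int)) = some v → v = pvD ns after a b i j

theorem pvF_correct (ns : Int) (after : List (List Int)) (a b : List Int) :
    ∀ (n i j : Nat), i + j ≤ n → ∀ memo, Sound ns after a b memo →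
    (pvF ns after a b i j memo).1 = pvD ns after a b i j ∧
    Sound ns after a b (pvF ns after a b i j memo).2 := by
  intro n
  induction n with
  | zero =>
    intro i j hn memo hs
    have hi : i = 0 := by omega
    have hj : j = 0 := by omega
    subst hi; subst hj
    rw [pvF]
    simp [pvD_zz, hs]
  | succ n ih =>
    intro i j hn memo hs
    rw [pvF]
    by_cases h00 : i = 0 ∧ j = 0
    · rw [if_pos h00]
      obtain ⟨rfl, rfl⟩ := h00
      exact ⟨(pvD_zz ns after a b).symm, hs⟩
    · rw [if_neg h00]
      cases hget : PySem.Dict.get? memo ((i:Int), (j:Int)) with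
      | some v => exact ⟨hs i j v hget, hs⟩
      | none =>
        simp only []
        -- evaluate p1 and p2 by cases on i, j
        cases i with
        | zero =>
          cases j with
          | zero => exact absurd ⟨rfl, rfl⟩ h00
          | succ j' =>
            simp only [lt_irrefl, dite_false, Nat.succ_sub_one, dite_true, Nat.zero_lt_succ]
            obtain ⟨hq1, hq2⟩ := ih 0 j' (by omega) memo hs
            have hc : ((j'+1 : Nat) : Int) - 1 = (j' : Int) := by push_cast; ring
            constructor
            · rw [hq1, hc, pvD_0b]
            · intro i2 j2 v2 hv2
              rw [PySem.Dict.get?_insert] at hv2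
              split at hv2
              · next heq =>
                have h1 : i2 = 0 := by
                  have := congrArg Prod.fst heq; simpa using this
                have h2 : j2 = j' + 1 := by
                  have := congrArg Prod.snd heq
                  simp only at this; exact_mod_cast this
                subst h1; subst h2
                cases hv2
                rw [hq1, hc, pvD_0b]
              · exact hq2 i2 j2 v2 hv2
        | succ i' =>
          have hca : ((i'+1 : Nat) : Int) - 1 = (i' : Int) := by push_cast; ring
          obtain ⟨hq1, hq2⟩ := ih i' j (by omega) memo hs
          cases j with
          | zero =>
            simp only [Nat.zero_lt_succ, dite_true, lt_irrefl, dite_false, Nat.succ_sub_one]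
            constructor
            · rw [hq1, hca, pvD_a0]
            · intro i2 j2 v2 hv2
              rw [PySem.Dict.get?_insert] at hv2
              split at hv2
              · next heq =>
                have h1 : i2 = i' + 1 := by
                  have := congrArg Prod.fst heq; simp only at this; exact_mod_cast this
                have h2 : j2 = 0 := by
                  have := congrArg Prod.snd heq; simpa using this
                subst h1; subst h2
                cases hv2
                rw [hq1, hca, pvD_a0]
              · exact hq2 i2 j2 v2 hv2
          | succ j' =>
            have hcb : ((j'+1 : Nat) : Int) - 1 = (j' : Int) := by push_cast; ring
            obtain ⟨hr1, hr2⟩ := ih (i'+1) j' (by omega)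
              (pvF ns after a b i' (j'+1) memo).2 hq2
            simp only [Nat.zero_lt_succ, dite_true, Nat.succ_sub_one]
            constructor
            · rw [hq1, hr1, hca, hcb, pvD_ab]
            · intro i2 j2 v2 hv2
              rw [PySem.Dict.get?_insert] at hv2
              split at hv2
              · next heq =>
                have h1 : i2 = i' + 1 := by
                  have := congrArg Prod.fst heq; simp only at this; exact_mod_cast this
                have h2 : j2 = j' + 1 := by
                  have := congrArg Prod.snd heq; simp only at this; exact_mod_cast this
                subst h1; subst h2
                cases hv2
                rw [hq1, hr1, hca, hcb, pvD_ab]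
              · exact hr2 i2 j2 v2 hv2

-- ===== A side: the in-place grid fill computes pvD =====

def Cell (dp : List (List Int)) (i j : Nat) : Int :=
  PySem.List.pyGetD (PySem.List.pyGetD dp (i:Int) []) (j:Int) 0

def nstep (ns : Int) (after : List (List Int)) (a b : List Int) (dp : List (List Int)) (i j : Nat) : List (List Int) :=
  if (i:Int) = 0 ∧ (j:Int) = 0 then dp
  else PySem.List.pySetD dp (i:Int) (PySem.List.pySetD (PySem.List.pyGetD dp (i:Int) []) (j:Int)
    (min (if (0:Int) < (i:Int) then pvAt after ns (PySem.List.pyGetD (PySem.List.pyGetD dp ((i:Int)-1) []) (j:Int) 0) (PySem.List.pyGetD a ((i:Int)-1) 0) else ns)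
         (if (0:Int) < (j:Int) then pvAt after ns (PySem.List.pyGetD (PySem.List.pyGetD dp (i:Int) []) ((j:Int)-1) 0) (PySem.List.pyGetD b ((j:Int)-1) 0) else ns) + 1))

theorem nstep_inv (ns : Int) (after : List (List Int)) (a b : List Int) (na nb : Nat)
    (i j1 : Nat) (hi : i ≤ na) (hj : j1 ≤ nb) (dp : List (List Int))
    (hlen : dp.length = na+1) (hrows : ∀ r ∈ dp, r.length = nb+1) (h00 : Cell dp 0 0 = 0)
    (hprev : ∀ i' j', i' < i → j' ≤ nb → Cell dp i' j' = pvD ns after a b i' j')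
    (hcur : ∀ j', j' < j1 → Cell dp i j' = pvD ns after a b i j') :
    (nstep ns after a b dp i j1).length = na+1 ∧
    (∀ r ∈ nstep ns after a b dp i j1, r.length = nb+1) ∧
    Cell (nstep ns after a b dp i j1) 0 0 = 0 ∧
    (∀ i' j', i' < i → j' ≤ nb → Cell (nstep ns after a b dp i j1) i' j' = pvD ns after a b i' j') ∧
    (∀ j', j' < j1+1 → Cell (nstep ns after a b dp i j1) i j' = pvD ns after a b i j') := by
  by_cases hg : i = 0 ∧ j1 = 0
  · obtain ⟨rfl, rfl⟩ := hg
    have : nstep ns after a b dp 0 0 = dp := by simp [nstep]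
    rw [this]
    refine ⟨hlen, hrows, h00, hprev, ?_⟩
    intro j' hj'
    interval_cases j'
    rw [h00, pvD_zz]
  · have hg' : ¬((i:Int) = 0 ∧ (j1:Int) = 0) := by
      simpa [Nat.cast_eq_zero] using hg
    have hilen : i < dp.length := by omega
    set row := PySem.List.pyGetD dp (i:Int) [] with hrowdef
    have hrowmem : row ∈ dp := by
      rw [hrowdef, PySem.List.pyGetD_natCast, List.getD_eq_getElem _ _ hilen]
      exact List.getElem_mem _
    have hrlen : row.length = nb+1 := hrows _ hrowmem
    have hj1row : j1 < row.length := by omega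
    -- the written value equals pvD i j1
    have hv : (min (if (0:Int) < (i:Int) then pvAt after ns (PySem.List.pyGetD (PySem.List.pyGetD dp ((i:Int)-1) []) (j1:Int) 0) (PySem.List.pyGetD a ((i:Int)-1) 0) else ns)
         (if (0:Int) < (j1:Int) then pvAt after ns (PySem.List.pyGetD (PySem.List.pyGetD dp (i:Int) []) ((j1:Int)-1) 0) (PySem.List.pyGetD b ((j1:Int)-1) 0) else ns) + 1)
        = pvD ns after a b i j1 := by
      cases i with
      | zero =>
        cases j1 with
        | zero => exact absurd ⟨rfl, rfl⟩ hg
        | succ j =>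
          rw [if_neg (by simp), if_pos (by positivity)]
          rw [show ((j+1:Nat):Int) - 1 = (j:Int) from by push_cast; ring]
          rw [pvD_0b]
          have := hcur j (by omega)
          rw [Cell] at this
          rw [this]
      | succ i' =>
        have hl : ((i'+1:Nat):Int) - 1 = (i':Int) := by push_cast; ring
        cases j1 with
        | zero =>
          rw [if_pos (by positivity), if_neg (by simp), hl]
          rw [pvD_a0]
          have := hprev i' 0 (by omega) (by omega)
          rw [Cell] at this
          rw [this]
        | succ j =>
          rw [if_pos (by positivity), if_pos (by positivity), hl]
          rw [show ((j+1:Nat):Int) - 1 = (j:Int) from by push_cast; ring]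
          rw [pvD_ab]
          have h1 := hprev i' (j+1) (by omega) (by omega)
          have h2 := hcur j (by omega)
          rw [Cell] at h1 h2
          rw [h1, h2]
    have hstep : nstep ns after a b dp i j1
        = PySem.List.pySetD dp (i:Int) (PySem.List.pySetD row (j1:Int) (pvD ns after a b i j1)) := by
      rw [nstep, if_neg hg', hv]
    rw [hstep]
    set v := pvD ns after a b i j1
    set newrow := PySem.List.pySetD row (j1:Int) v with hnewrow
    have hnrlen : newrow.length = nb+1 := by rw [hnewrow, PySem.List.length_pySetD, hrlen]
    have hread : ∀ (m : Nat) (d : List Int), PySem.List.pyGetD (PySem.List.pySetD dp (i:Int) newrow) (m:Int) d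
        = if m = i then newrow else PySem.List.pyGetD dp (m:Int) d := by
      intro m d
      rw [PySem.List.pyGetD_pySetD_natCast _ _ _ _ _ hilen]
    have hreadrow : ∀ (m : Nat), PySem.List.pyGetD newrow (m:Int) 0
        = if m = j1 then v else PySem.List.pyGetD row (m:Int) 0 := by
      intro m
      rw [hnewrow, PySem.List.pyGetD_pySetD_natCast _ _ _ _ _ hj1row]
    refine ⟨by rw [PySem.List.length_pySetD, hlen], ?_, ?_, ?_, ?_⟩
    · intro r hr
      rcases mem_pySetD hr with h | rfl
      · exact hrows _ h
      · exact hnrlen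
    · rw [Cell, hread]
      by_cases h0 : (0:Nat) = i
      · rw [if_pos h0]
        have hj1ne : j1 ≠ 0 := fun h => hg ⟨h0.symm, h⟩
        rw [hreadrow, if_neg (by omega), hrowdef, ← h0]
        exact h00
      · rw [if_neg h0]
        exact h00
    · intro i' j' hi' hj'
      rw [Cell, hread, if_neg (by omega)]
      exact hprev i' j' hi' hj'
    · intro j' hj'
      rw [Cell, hread, if_pos rfl, hreadrow]
      by_cases hjj : j' = j1
      · rw [if_pos hjj, hjj]
      · rw [if_neg hjj]
        exact hcur j' (by omega)

theorem inner_fold (ns : Int) (after : List (List Int)) (a b : List Int) (na nb : Nat)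
    (i : Nat) (hi : i ≤ na) :
    ∀ (k j1 : Nat), j1 + k ≤ nb + 1 → ∀ dp : List (List Int),
    dp.length = na+1 → (∀ r ∈ dp, r.length = nb+1) → Cell dp 0 0 = 0 →
    (∀ i' j', i' < i → j' ≤ nb → Cell dp i' j' = pvD ns after a b i' j') →
    (∀ j', j' < j1 → Cell dp i j' = pvD ns after a b i j') →
    ((List.range' j1 k).foldl (fun dp (j : Nat) => nstep ns after a b dp i j) dp).length = na+1 ∧
    (∀ r ∈ (List.range' j1 k).foldl (fun dp (j : Nat) => nstep ns after a b dp i j) dp, r.length = nb+1) ∧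
    Cell ((List.range' j1 k).foldl (fun dp (j : Nat) => nstep ns after a b dp i j) dp) 0 0 = 0 ∧
    (∀ i' j', i' < i → j' ≤ nb → Cell ((List.range' j1 k).foldl (fun dp (j : Nat) => nstep ns after a b dp i j) dp) i' j' = pvD ns after a b i' j') ∧
    (∀ j', j' < j1+k → Cell ((List.range' j1 k).foldl (fun dp (j : Nat) => nstep ns after a b dp i j) dp) i j' = pvD ns after a b i j') := by
  intro k
  induction k with
  | zero =>
    intro j1 hk dp h1 h2 h3 h4 h5
    simp only [List.range'_zero, List.foldl_nil]
    exact ⟨h1, h2, h3, h4, fun j' hj' => h5 j' (by omega)⟩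
  | succ k ih =>
    intro j1 hk dp h1 h2 h3 h4 h5
    rw [List.range'_succ]
    simp only [List.foldl_cons]
    obtain ⟨g1, g2, g3, g4, g5⟩ := nstep_inv ns after a b na nb i j1 hi (by omega) dp h1 h2 h3 h4 h5
    obtain ⟨f1, f2, f3, f4, f5⟩ := ih (j1+1) (by omega) _ g1 g2 g3 g4 g5
    exact ⟨f1, f2, f3, f4, fun j' hj' => f5 j' (by omega)⟩

theorem outer_fold (ns : Int) (after : List (List Int)) (a b : List Int) (na nb : Nat)
    (dp0 : List (List Int)) (h1 : dp0.length = na+1) (h2 : ∀ r ∈ dp0, r.length = nb+1)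
    (h3 : Cell dp0 0 0 = 0) :
    ∀ (m : Nat), m ≤ na+1 →
    (∀ i j, i < m → j ≤ nb → Cell ((List.range m).foldl (fun dp (i : Nat) =>
        (List.range' 0 (nb+1)).foldl (fun dp (j : Nat) => nstep ns after a b dp i j) dp) dp0) i j
      = pvD ns after a b i j) := by
  have main : ∀ (m : Nat), m ≤ na+1 →
      ((List.range m).foldl (fun dp (i : Nat) =>
        (List.range' 0 (nb+1)).foldl (fun dp (j : Nat) => nstep ns after a b dp i j) dp) dp0).length = na+1 ∧
      (∀ r ∈ (List.range m).foldl (fun dp (i : Nat) =>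
        (List.range' 0 (nb+1)).foldl (fun dp (j : Nat) => nstep ns after a b dp i j) dp) dp0, r.length = nb+1) ∧
      Cell ((List.range m).foldl (fun dp (i : Nat) =>
        (List.range' 0 (nb+1)).foldl (fun dp (j : Nat) => nstep ns after a b dp i j) dp) dp0) 0 0 = 0 ∧
      (∀ i j, i < m → j ≤ nb → Cell ((List.range m).foldl (fun dp (i : Nat) =>
        (List.range' 0 (nb+1)).foldl (fun dp (j : Nat) => nstep ns after a b dp i j) dp) dp0) i j
        = pvD ns after a b i j) := by
    intro m
    induction m with
    | zero =>
      intro _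
      simp only [List.range_zero, List.foldl_nil]
      exact ⟨h1, h2, h3, fun i j hi _ => absurd hi (by omega)⟩
    | succ m ihm =>
      intro hm
      obtain ⟨g1, g2, g3, g4⟩ := ihm (by omega)
      rw [List.range_succ (n := m), List.foldl_append, List.foldl_cons, List.foldl_nil]
      obtain ⟨f1, f2, f3, f4, f5⟩ := inner_fold ns after a b na nb m (by omega) (nb+1) 0 (by omega)
        _ g1 g2 g3 (fun i' j' hi' hj' => g4 i' j' hi' hj') (fun j' hj' => absurd hj' (by omega))
      refine ⟨f1, f2, f3, ?_⟩
      intro i j hi hj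
      by_cases hcase : i < m
      · exact f4 i j hcase hj
      · have : i = m := by omega
        subst this
        exact f5 j (by omega)
  intro m hm
  exact (main m hm).2.2.2

theorem pyfold_nat {β : Type} (f : β → Int → β) (init : β) (n : Nat) :
    (PySem.List.pyRange 0 (n:Int)).foldl f init = (List.range' 0 n).foldl (fun acc (k : Nat) => f acc (k:Int)) init := by
  rw [PySem.List.pyRange_zero_nat, List.foldl_map, List.range_eq_range']

theorem check_eq (s a b : List Int) (after : List (List Int)) :
    pvCheck s a b after = pvCheckTD s a b after := by
  unfold pvCheck pvCheckTD
  simp only []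
  by_cases hg : (s.length:Int) < (a.length:Int) + (b.length:Int)
  · rw [if_pos hg, if_pos hg]
  · rw [if_neg hg, if_neg hg]
    have c1 : ((a.length:Int) + 1) = ((a.length + 1 : Nat):Int) := by push_cast; ring
    have c2 : ((b.length:Int) + 1) = ((b.length + 1 : Nat):Int) := by push_cast; ring
    simp only [c1, c2, pyfold_nat]
    rw [show (List.range' 0 (a.length+1)) = List.range (a.length+1) from List.range_eq_range'.symm]
    set ns : Int := (s.length : Int) with hns
    set dp0 : List (List Int) := (List.map (fun _ => List.map (fun _ => (0:Int)) (PySem.List.pyRange 0 ((b.length + 1 : Nat) : Int)))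
      (PySem.List.pyRange 0 ((a.length + 1 : Nat) : Int))) with hdp0
    have h1 : dp0.length = a.length + 1 := by
      simp [hdp0]
    have h2 : ∀ r ∈ dp0, r.length = b.length + 1 := by
      intro r hr
      rw [hdp0] at hr
      simp only [List.mem_map] at hr
      obtain ⟨_, _, rfl⟩ := hr
      simp
    have h3 : Cell dp0 0 0 = 0 := by
      unfold Cell
      rw [hdp0, PySem.List.pyRange_zero_nat, PySem.List.pyRange_zero_nat]
      simp [PySem.List.pyGetD_zero]
    have e1 : (List.range (a.length+1)).foldl (fun acc (k : Nat) =>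
        List.foldl
          (fun (acc2 : List (List Int)) (k2 : Nat) =>
            if (k:Int) = 0 ∧ (k2:Int) = 0 then acc2
            else
              PySem.List.pySetD acc2 (k:Int)
                (PySem.List.pySetD (PySem.List.pyGetD acc2 (k:Int) []) (k2:Int)
                  (min
                      (if 0 < (k:Int) then
                        pvAt after ns (PySem.List.pyGetD (PySem.List.pyGetD acc2 ((k:Int) - 1) []) (k2:Int) 0)
                          (PySem.List.pyGetD a ((k:Int) - 1) 0)
                      else ns)
                      (if 0 < (k2:Int) then
                        pvAt after ns (PySem.List.pyGetD (PySem.List.pyGetD acc2 (k:Int) []) ((k2:Int) - 1) 0)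
                          (PySem.List.pyGetD b ((k2:Int) - 1) 0)
                      else ns) +
                    1)))
          acc (List.range' 0 (b.length + 1))) dp0
        = (List.range (a.length+1)).foldl (fun dp (i : Nat) =>
            (List.range' 0 (b.length + 1)).foldl (fun dp (j : Nat) => nstep ns after a b dp i j) dp) dp0 := rfl
    rw [e1]
    have e3 := outer_fold ns after a b a.length b.length dp0 h1 h2 h3 (a.length+1) le_rfl a.length b.length (by omega) (by omega)
    unfold Cell at e3
    rw [e3]
    -- B side: the memoized recursion from the empty dict computes the same cell
    have hemp : Sound ns after a b PySem.Dict.empty := by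
      intro i j v hv
      rw [PySem.Dict.get?_empty] at hv
      cases hv
    have := (pvF_correct ns after a b (a.length + b.length) a.length b.length le_rfl
      PySem.Dict.empty hemp).1
    rw [this]

theorem solve_eq : ∀ (s t : List Int), solve s t = solve_alt s t := by
  intro s t
  unfold solve solve_alt
  have h : ∀ i ∈ PySem.List.pyRange 0 (t.length : Int),
      pvCheck s (PySem.List.slice t none (some i)) (PySem.List.slice t (some i) none) (pvAfter s)
      = pvCheckTD s (PySem.List.slice t none (some i)) (PySem.List.slice t (some i) none) (pvAfter s) := by
    intro i _
    exact check_eq _ _ _ _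
  simp only []
  rw [PySem.List.any_congr_mem h]

-- ===== VERDICT (by name: the statement is the Claim_ definition above) =====
theorem solve_spec : Claim_equal_solve := by
  intro s t _ _
  unfold Spec_solve
  exact solve_eq s t
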